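-- pv_equiv track=rewrite | github.com/robotenique/movies-ontology | imdbAnalyzer.py | st_op
-- ===== SOURCE A (Python) =====
-- def st_op(t):
--     s = t
--     p = s.find("(")
--     count = 0
--     while p < len(s) and p + 1 < len(s) and not s[p+1].isdigit() and not s[p+1] == '?':
--         tlist = list(s)
--         tlist[p] = '_'
--         s = "".join(tlist)
--         p = s.find("(")
--         count += 1
--         if count > 20:
--             return len(t)
--     return p
-- ===== SOURCE B (Python) =====
-- def st_op(t):
--     """Index of the first '(' that starts a year marker (next char a digit or '?',
--     or the '(' is the last char); skipping more than 20 other '('s, or finding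
--     none at all, yields len(t) (cut nothing)."""
--     n = len(t)
--     skips = 0
--     for i in range(n):
--         if t[i] == '(':
--             if i + 1 == n or t[i + 1].isdigit() or t[i + 1] == '?':
--                 return i
--             skips += 1
--             if skips > 20:
--                 return n
--     return n
-- ===== Notes on version B (the rewrite author's own statement) =====
-- stated objective: faster
-- what changed: Single left-to-right index scan with a skip counter replaces A's loop that blanks a left parenthesis, rebuilds the whole string and re-runs find from the start on every iteration; the no-match result is uniformly len(t).
-- intended difference: On the empty string and on strings whose first character is a digit or question mark that contain no stopping left parenthesis (one followed by a digit or question mark, or final) and at most 20 other left parentheses, A returns -1 because find yields -1 and s[p+1] accidentally reads s[0], while B returns len(t) - the no-match value A itself returns for every other first character and the intended cut-nothing result. — e.g. on st_op("5"): A returns -1, B returns 1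
import Mathlib
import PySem

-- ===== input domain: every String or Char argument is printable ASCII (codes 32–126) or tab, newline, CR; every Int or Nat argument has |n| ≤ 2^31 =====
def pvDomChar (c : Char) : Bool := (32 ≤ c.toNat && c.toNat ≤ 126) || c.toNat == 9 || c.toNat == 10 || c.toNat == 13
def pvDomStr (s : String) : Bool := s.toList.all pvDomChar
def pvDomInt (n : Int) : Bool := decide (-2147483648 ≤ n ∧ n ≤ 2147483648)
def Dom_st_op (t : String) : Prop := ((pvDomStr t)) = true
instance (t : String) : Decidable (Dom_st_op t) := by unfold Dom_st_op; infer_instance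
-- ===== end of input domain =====

-- B replaces A's repeated blank-then-rebuild-then-re-find loop by one left-to-right scan
-- with a skip counter (objective: faster, measured; no string is ever copied); on the inputs
-- of D_ below A accidentally returns -1 where B returns len(t).

-- ===== PORT A =====
-- A's while loop; state: length of the original t, the current string s as the list of
-- its chars (Python's list(s)/''.join round-trip), p = s.find('('), count.
-- s[p+1] is read only when p+1 < len(s); since p ≥ -1, p+1 ≥ 0 there, so pyGetD is exact;
-- tlist[p] = '_' is PySem.List.pySetD (p is always in range when the loop body runs).
def stOpGo (tlen : Nat) (s : List Char) (p : Int) (count : Nat) : Int :=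
  if p < (s.length : Int) ∧ p + 1 < (s.length : Int) ∧
      ¬ PySem.Chars.isdigit (PySem.List.pyGetD s (p + 1) ' ') = true ∧
      ¬ PySem.List.pyGetD s (p + 1) ' ' = '?' then
    if count + 1 > 20 then (tlen : Int)
    else stOpGo tlen (PySem.List.pySetD s p '_')
      (PySem.Chars.find (PySem.List.pySetD s p '_') ['(']) (count + 1)
  else p
termination_by 21 - count
decreasing_by omega

def st_op (t : String) : Int :=
  stOpGo t.toList.length t.toList (PySem.Chars.find t.toList ['(']) 0

-- ===== PORT B =====
-- B's for loop over the index i; t[i+1] is read only when i+1 < n (Python short-circuit),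
-- so pyGetD is exact there; falling off the loop returns n.
def stOpAltGo (t : List Char) (i : Nat) (skips : Nat) : Int :=
  if h : i < t.length then
    if t[i] = '(' then
      if i + 1 = t.length ∨ PySem.Chars.isdigit (PySem.List.pyGetD t ((i : Int) + 1) ' ') = true
          ∨ PySem.List.pyGetD t ((i : Int) + 1) ' ' = '?' then (i : Int)
      else if skips + 1 > 20 then (t.length : Int)
      else stOpAltGo t (i + 1) (skips + 1)
    else stOpAltGo t (i + 1) skips
  else (t.length : Int)
termination_by t.length - i
decreasing_by all_goals omega

def st_op_alt (t : String) : Int := stOpAltGo t.toList 0 0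

-- ===== PRECONDITION & SPEC =====
-- a char A's loop stops in front of: a digit or '?'
def pvStop (c : Char) : Bool := PySem.Chars.isdigit c || c == '?'

-- On the empty string and on strings whose first character is a digit or question mark that
-- contain no stopping left parenthesis (one followed by a digit or question mark, or final)
-- and at most 20 other left parentheses, A returns -1 because find yields -1 and s[p+1]
-- accidentally reads s[0], while B returns len(t) - the no-match value A itself returns for
-- every other first character and the intended cut-nothing result.
def D_st_op (t : String) : Prop :=
  let s := t.toList
  s.count '(' ≤ 20 ∧ pvStop (s.headD '?') ∧ s.getLast? ≠ some '(' ∧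
    ∀ p ∈ s.zip s.tail, p.1 = '(' → ¬ pvStop p.2
instance (t : String) : Decidable (D_st_op t) := by unfold D_st_op; infer_instance

def Spec_st_op (t : String) (out : Int) : Prop := ¬ D_st_op t → out = st_op_alt t
instance (t : String) (out : Int) : Decidable (Spec_st_op t out) := by unfold Spec_st_op; infer_instance

def pvDiffWitness_st_op : String := "5"
def pvDiffWitnessOut_st_op : Int × Int := (-1, 1)

-- ===== CLAIM (what is proved, stated in full; the proofs are below) =====
def Claim_unchanged_st_op : Prop := ∀ (t : String), Dom_st_op t → Spec_st_op t (st_op t)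
def Claim_changed_st_op : Prop := Dom_st_op (pvDiffWitness_st_op) ∧ D_st_op (pvDiffWitness_st_op) ∧ st_op (pvDiffWitness_st_op) = pvDiffWitnessOut_st_op.1 ∧ st_op_alt (pvDiffWitness_st_op) = pvDiffWitnessOut_st_op.2 ∧ pvDiffWitnessOut_st_op.1 ≠ pvDiffWitnessOut_st_op.2
def Claim_exact_st_op : Prop := ∀ (t : String), Dom_st_op t → D_st_op t → st_op t ≠ st_op_alt t

-- ===== LEMMAS AND PROOFS =====

-- proof-side form of D_'s last conjunct: no index of s carries a stopping '('
def noStopB (s : List Char) : Bool :=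
  (List.range s.length).all (fun i =>
    decide (s.getD i ' ' = '(' →
      (i + 1 < s.length ∧ ¬ PySem.Chars.isdigit (s.getD (i + 1) ' ') = true ∧
        s.getD (i + 1) ' ' ≠ '?')))

-- how A 'blanks' a char: '(' becomes '_', everything else stays
def blankC (c : Char) : Char := if c = '(' then '_' else c

lemma blankC_ne_paren (c : Char) : blankC c ≠ '(' := by
  by_cases h : c = '(' <;> simp [blankC, h]

lemma blankC_eq {c : Char} (h : c ≠ '(') : blankC c = c := by simp [blankC, h]

lemma not_paren_map_blank (pre : List Char) : '(' ∉ pre.map blankC := by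
  intro hmem
  rw [List.mem_map] at hmem
  obtain ⟨c, -, hc⟩ := hmem
  exact blankC_ne_paren c hc

lemma isdigit_blankC (c : Char) : PySem.Chars.isdigit (blankC c) = PySem.Chars.isdigit c := by
  unfold blankC
  split
  · rename_i h; subst h; decide
  · rfl

lemma blankC_eq_qmark_iff (c : Char) : blankC c = '?' ↔ c = '?' := by
  unfold blankC
  split
  · rename_i h; subst h; decide
  · exact Iff.rfl

lemma find_paren_none {s : List Char} (h : '(' ∉ s) : PySem.Chars.find s ['('] = -1 := by
  rw [PySem.Chars.find_eq_neg_one_iff]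
  intro hin
  exact h (by simpa using hin.mem (by simp))

lemma find_paren_append {q v : List Char} (hq : '(' ∉ q) :
    PySem.Chars.find (q ++ '(' :: v) ['('] = (q.length : Int) := by
  set s := q ++ '(' :: v with hs
  have hpre : ['('] <+: s.drop q.length := by
    rw [hs, List.drop_append]
    simp
  have hnn : 0 ≤ PySem.Chars.find s ['('] := by
    rw [PySem.Chars.find_nonneg_iff]
    exact hpre.isInfix.trans (List.drop_suffix _ _).isInfix
  obtain ⟨h1, h2⟩ := PySem.Chars.find_spec hnn
  have hle : (PySem.Chars.find s ['(']).toNat ≤ q.length := by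
    by_contra hlt
    exact h2 q.length (by omega) hpre
  have hget : s[(PySem.Chars.find s ['(']).toNat]? = some '(' := by
    rw [← List.head?_drop]
    rcases h1 with ⟨t, ht⟩
    rw [← ht]; rfl
  have heq : (PySem.Chars.find s ['(']).toNat = q.length := by
    rcases Nat.lt_or_ge (PySem.Chars.find s ['(']).toNat q.length with hlt | hge
    · exfalso
      rw [hs, List.getElem?_append_left hlt] at hget
      exact hq (List.mem_of_getElem? hget)
    · omega
  omega

lemma pySetD_neg_one (s : List Char) (h : s ≠ []) (v : Char) :
    PySem.List.pySetD s (-1) v = s.set (s.length - 1) v := by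
  have h1 : 1 ≤ s.length := List.length_pos_of_ne_nil h
  simp [PySem.List.pySetD, PySem.List.pySet?, PySem.List.pyIdx?, h1]

lemma set_append_mid (q : List Char) (c : Char) (r : List Char) (x : Char) :
    (q ++ c :: r).set q.length x = q ++ x :: r := by
  induction q with
  | nil => rfl
  | cons a q' ih => simp [ih]

lemma getD_append_at (q : List Char) (c : Char) (r : List Char) :
    (q ++ c :: r).getD q.length ' ' = c := by
  simp [List.getD]

lemma noStopB_iff (s : List Char) : noStopB s = true ↔
    ∀ i, i < s.length → s.getD i ' ' = '(' →
      (i + 1 < s.length ∧ ¬ PySem.Chars.isdigit (s.getD (i + 1) ' ') = true ∧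
        s.getD (i + 1) ' ' ≠ '?') := by
  unfold noStopB
  rw [List.all_eq_true]
  constructor
  · intro h i hi
    exact of_decide_eq_true (h i (List.mem_range.mpr hi))
  · intro h i hi
    exact decide_eq_true (h i (List.mem_range.mp hi))

lemma zip_pair_mem (s : List Char) (i : Nat) (h : i + 1 < s.length) :
    (s[i], s[i+1]) ∈ s.zip s.tail := by
  have hlen : i < (s.zip s.tail).length := by
    simp [List.length_zip, List.length_tail]
    omega
  have hg : (s.zip s.tail)[i] = (s[i], s[i+1]) := by
    rw [List.getElem_zip]
    rw [List.getElem_tail]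
  exact hg ▸ List.getElem_mem hlen

lemma mem_zip_pair (s : List Char) {p : Char × Char} (hp : p ∈ s.zip s.tail) :
    ∃ i, ∃ _ : i + 1 < s.length, p = (s[i], s[i+1]) := by
  obtain ⟨i, hi, hg⟩ := List.getElem_of_mem hp
  have hib : i + 1 < s.length := by
    simp [List.length_zip, List.length_tail] at hi
    omega
  refine ⟨i, hib, ?_⟩
  rw [← hg, List.getElem_zip, List.getElem_tail]

lemma D_iff' (s : List Char) :
    (s.count '(' ≤ 20 ∧ pvStop (s.headD '?') = true ∧ s.getLast? ≠ some '(' ∧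
      ∀ p ∈ s.zip s.tail, p.1 = '(' → ¬ pvStop p.2 = true) ↔
    (s = [] ∨
      ((PySem.Chars.isdigit (s.getD 0 ' ') = true ∨ s.getD 0 ' ' = '?') ∧
        s.count '(' ≤ 20 ∧
        ∀ i, i < s.length → s.getD i ' ' = '(' →
          (i + 1 < s.length ∧ ¬ PySem.Chars.isdigit (s.getD (i + 1) ' ') = true ∧
            s.getD (i + 1) ' ' ≠ '?'))) := by
  cases s with
  | nil => simp [pvStop]
  | cons c s' =>
    constructor
    · rintro ⟨hc, hf, hl, hp⟩
      right
      refine ⟨?_, hc, ?_⟩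
      · have hf' : pvStop c = true := by simpa using hf
        simp only [pvStop, Bool.or_eq_true, beq_iff_eq] at hf'
        simpa using hf'
      · intro i hi hpi
        have hgi : (c :: s')[i]'hi = '(' := by
          rw [← List.getD_eq_getElem _ ' ' hi]
          exact hpi
        have h2 : i + 1 < (c :: s').length := by
          rcases Nat.lt_or_ge (i + 1) (c :: s').length with h | h
          · exact h
          · exfalso
            apply hl
            rw [List.getLast?_eq_getElem?]
            have hieq : (c :: s').length - 1 = i := by omega
            rw [hieq, List.getElem?_eq_getElem hi, hgi]
        have hstop := hp _ (zip_pair_mem (c :: s') i h2) hgi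
        simp only [pvStop, Bool.or_eq_true, beq_iff_eq] at hstop
        push_neg at hstop
        rw [List.getD_eq_getElem _ ' ' h2]
        exact ⟨h2, hstop.1, hstop.2⟩
    · rintro (h | ⟨h0, hc, ha⟩)
      · exact absurd h (by simp)
      · refine ⟨hc, ?_, ?_, ?_⟩
        · simp only [List.headD_cons, pvStop, Bool.or_eq_true, beq_iff_eq]
          simpa using h0
        · intro hl
          rw [List.getLast?_eq_getElem?] at hl
          have hlen : (c :: s').length - 1 < (c :: s').length := by simp
          rw [List.getElem?_eq_getElem hlen] at hl
          have hg : (c :: s')[(c :: s').length - 1]'hlen = '(' := by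
            exact Option.some.inj hl
          have := ha ((c :: s').length - 1) hlen
            (by rw [List.getD_eq_getElem _ ' ' hlen]; exact hg)
          omega
        · intro p hpmem hp1
          obtain ⟨i, hib, rfl⟩ := mem_zip_pair _ hpmem
          have := ha i (by omega)
            (by rw [List.getD_eq_getElem _ ' ' (by omega : i < (c :: s').length)]; exact hp1)
          simp only [pvStop, Bool.or_eq_true, beq_iff_eq]
          push_neg
          rw [List.getD_eq_getElem _ ' ' hib] at this
          exact ⟨this.2.1, this.2.2⟩

lemma D_iff (t : String) : D_st_op t ↔
    (t.toList = [] ∨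
      ((PySem.Chars.isdigit (t.toList.getD 0 ' ') = true ∨ t.toList.getD 0 ' ' = '?') ∧
        t.toList.count '(' ≤ 20 ∧ noStopB t.toList = true)) := by
  rw [noStopB_iff]
  exact D_iff' t.toList

-- the p = -1 tail of A's loop when s[0] is no stop char: the last char gets blanked
-- until count exceeds 20 and len(t) is returned
lemma drain : ∀ (fuel : Nat) (s : List Char) (skips : Nat), skips ≤ 20 → 20 - skips = fuel →
    s ≠ [] → ¬ PySem.Chars.isdigit (s.getD 0 ' ') = true → ¬ s.getD 0 ' ' = '?' →
    '(' ∉ s → ∀ tlen : Nat, stOpGo tlen s (-1) skips = (tlen : Int) := by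
  intro fuel
  induction fuel with
  | zero =>
    intro s skips h1 h2 hne hd hq hp tlen
    have hlen : 0 < s.length := List.length_pos_of_ne_nil hne
    rw [stOpGo]
    simp only [neg_add_cancel, PySem.List.pyGetD_zero]
    rw [if_pos ⟨by omega, by omega, hd, hq⟩, if_pos (by omega)]
  | succ n ih =>
    intro s skips h1 h2 hne hd hq hp tlen
    have hlen : 0 < s.length := List.length_pos_of_ne_nil hne
    by_cases hsk : skips = 20
    · rw [stOpGo]
      simp only [neg_add_cancel, PySem.List.pyGetD_zero]
      rw [if_pos ⟨by omega, by omega, hd, hq⟩, if_pos (by omega)]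
    · rw [stOpGo]
      simp only [neg_add_cancel, PySem.List.pyGetD_zero]
      rw [if_pos ⟨by omega, by omega, hd, hq⟩, if_neg (by omega)]
      rw [pySetD_neg_one s hne]
      have hp' : '(' ∉ s.set (s.length - 1) '_' := by
        intro hm
        rcases List.mem_or_eq_of_mem_set hm with hm' | hm'
        · exact hp hm'
        · exact absurd hm'.symm (by decide)
      rw [find_paren_none hp']
      apply ih _ (skips + 1) (by omega) (by omega) (by simpa using hne) ?_ ?_ hp' tlen
      · by_cases hone : s.length = 1
        · have h0 : s.length - 1 = 0 := by omega
          rw [h0]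
          cases s with
          | nil => exact absurd rfl hne
          | cons a s' => simp only [List.set_cons_zero, List.getD_cons_zero]; decide
        · rwa [List.getD_eq_getElem?_getD, List.getElem?_set_ne (by omega),
            ← List.getD_eq_getElem?_getD]
      · by_cases hone : s.length = 1
        · have h0 : s.length - 1 = 0 := by omega
          rw [h0]
          cases s with
          | nil => exact absurd rfl hne
          | cons a s' => simp only [List.set_cons_zero, List.getD_cons_zero]; decide
        · rwa [List.getD_eq_getElem?_getD, List.getElem?_set_ne (by omega),
            ← List.getD_eq_getElem?_getD]

lemma main_lemma : ∀ (u pre : List Char) (skips : Nat), skips ≤ 20 →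
    pre.count '(' = skips →
    (∀ i, i < pre.length → (pre ++ u).getD i ' ' = '(' →
      (i + 1 < (pre ++ u).length ∧
        ¬ PySem.Chars.isdigit ((pre ++ u).getD (i + 1) ' ') = true ∧
        (pre ++ u).getD (i + 1) ' ' ≠ '?')) →
    ¬ (pre ++ u = [] ∨
        ((PySem.Chars.isdigit ((pre ++ u).getD 0 ' ') = true ∨ (pre ++ u).getD 0 ' ' = '?') ∧
          (pre ++ u).count '(' ≤ 20 ∧ noStopB (pre ++ u) = true)) →
    ∀ tlen : Nat, tlen = pre.length + u.length →
    stOpGo tlen (pre.map blankC ++ u) (PySem.Chars.find (pre.map blankC ++ u) ['(']) skips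
      = stOpAltGo (pre ++ u) pre.length skips := by
  intro u
  induction u with
  | nil =>
    intro pre skips hs hcount hnq hnd tlen htl
    simp only [List.append_nil] at hnq hnd ⊢
    simp only [List.length_nil, Nat.add_zero] at htl
    rw [find_paren_none (not_paren_map_blank pre)]
    have hne : pre ≠ [] := by rintro rfl; exact hnd (Or.inl rfl)
    have hnd0 : ¬ (PySem.Chars.isdigit (pre.getD 0 ' ') = true ∨ pre.getD 0 ' ' = '?') := by
      intro h0
      exact hnd (Or.inr ⟨h0, by omega, (noStopB_iff pre).mpr hnq⟩)
    push_neg at hnd0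
    rw [stOpAltGo, dif_neg (lt_irrefl _)]
    cases pre with
    | nil => exact absurd rfl hne
    | cons c pre' =>
      have hgd : (List.map blankC (c :: pre')).getD 0 ' ' = blankC c := by simp
      rw [drain (20 - skips) _ skips hs rfl (by simp) ?_ ?_ (not_paren_map_blank (c :: pre')) tlen]
      · rw [htl]
      · rw [hgd, isdigit_blankC]
        simpa using hnd0.1
      · rw [hgd]
        rw [blankC_eq_qmark_iff]
        simpa using hnd0.2
  | cons c u' ih =>
    intro pre skips hs hcount hnq hnd tlen htl
    by_cases hc : c = '('
    · subst hc
      rw [find_paren_append (not_paren_map_blank pre)]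
      simp only [List.length_map]
      have hilen : pre.length < (pre ++ '(' :: u').length := by simp
      rw [stOpAltGo, dif_pos hilen]
      rw [if_pos (by simp [List.getElem_append_right (Nat.le_refl pre.length)])]
      cases u' with
      | nil =>
        have hno : ¬ ((pre.length : Int) < ((List.map blankC pre ++ ['(']).length : Int) ∧
            (pre.length : Int) + 1 < ((List.map blankC pre ++ ['(']).length : Int) ∧
            ¬ PySem.Chars.isdigit (PySem.List.pyGetD (List.map blankC pre ++ ['(']) ((pre.length : Int) + 1) ' ') = true ∧
            ¬ PySem.List.pyGetD (List.map blankC pre ++ ['(']) ((pre.length : Int) + 1) ' ' = '?') := by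
          rintro ⟨-, h2, -⟩
          have hl : (List.map blankC pre ++ ['(']).length = pre.length + 1 := by simp
          rw [hl] at h2
          push_cast at h2
          omega
        rw [stOpGo, if_neg hno, if_pos (by simp)]
      | cons d u'' =>
        have hsplitA : List.map blankC pre ++ '(' :: d :: u''
            = (List.map blankC pre ++ ['(']) ++ d :: u'' := by simp
        have hsplitB : pre ++ '(' :: d :: u'' = (pre ++ ['(']) ++ d :: u'' := by simp
        have hA : PySem.List.pyGetD (List.map blankC pre ++ '(' :: d :: u'') ((pre.length : Int) + 1) ' ' = d := by
          have hcast : ((pre.length : Int) + 1) = ((pre.length + 1 : Nat) : Int) := by push_cast; ring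
          rw [hcast, PySem.List.pyGetD_natCast, hsplitA]
          have hl : pre.length + 1 = (List.map blankC pre ++ ['(']).length := by simp
          rw [hl]
          exact getD_append_at _ d u''
        have hB : PySem.List.pyGetD (pre ++ '(' :: d :: u'') ((pre.length : Int) + 1) ' ' = d := by
          have hcast : ((pre.length : Int) + 1) = ((pre.length + 1 : Nat) : Int) := by push_cast; ring
          rw [hcast, PySem.List.pyGetD_natCast, hsplitB]
          have hl : pre.length + 1 = (pre ++ ['(']).length := by simp
          rw [hl]
          exact getD_append_at _ d u''
        have hlenfull : (pre ++ '(' :: d :: u'').length = pre.length + (u''.length + 2) := by simp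
        by_cases hd : PySem.Chars.isdigit d = true ∨ d = '?'
        · rw [if_pos (by
            rw [hB]
            rcases hd with hd | hd
            · exact Or.inr (Or.inl hd)
            · exact Or.inr (Or.inr hd))]
          rw [stOpGo, if_neg]
          rintro ⟨-, -, hdig, hqm⟩
          rw [hA] at hdig hqm
          rcases hd with hd | hd
          · exact hdig hd
          · exact hqm hd
        · push_neg at hd
          rw [if_neg (by rw [hB]; push_neg; exact ⟨by rw [hlenfull]; omega, hd.1, hd.2⟩)]
          have hcond : ((pre.length : Int) < ((List.map blankC pre ++ '(' :: d :: u'').length : Int) ∧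
              (pre.length : Int) + 1 < ((List.map blankC pre ++ '(' :: d :: u'').length : Int) ∧
              ¬ PySem.Chars.isdigit (PySem.List.pyGetD (List.map blankC pre ++ '(' :: d :: u'') ((pre.length : Int) + 1) ' ') = true ∧
              ¬ PySem.List.pyGetD (List.map blankC pre ++ '(' :: d :: u'') ((pre.length : Int) + 1) ' ' = '?') := by
            refine ⟨?_, ?_, by rw [hA]; exact hd.1, by rw [hA]; exact hd.2⟩
            · have hl : (List.map blankC pre ++ '(' :: d :: u'').length = pre.length + (u''.length + 2) := by
                simp
              rw [hl]; push_cast; omega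
            · have hl : (List.map blankC pre ++ '(' :: d :: u'').length = pre.length + (u''.length + 2) := by
                simp
              rw [hl]; push_cast; omega
          rw [stOpGo, if_pos hcond]
          have hset : PySem.List.pySetD (List.map blankC pre ++ '(' :: d :: u'') (pre.length : Int) '_'
              = (pre ++ ['(']).map blankC ++ d :: u'' := by
            rw [PySem.List.pySetD_natCast]
            have hl : pre.length = (pre.map blankC).length := by simp
            rw [hl, set_append_mid]
            simp [blankC]
          rw [hset]
          by_cases hsk : skips = 20
          · have h21 : skips + 1 > 20 := by omega
            rw [if_pos h21, if_pos h21]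
            have hl : ((pre ++ '(' :: d :: u'').length : Int) = (tlen : Int) := by
              rw [htl]; push_cast; simp
            rw [hl]
          · rw [if_neg (by omega), if_neg (by omega)]
            have hcount' : (pre ++ ['(']).count '(' = skips + 1 := by
              simp [List.count_append, hcount]
            have hnq' : ∀ i, i < (pre ++ ['(']).length →
                ((pre ++ ['(']) ++ d :: u'').getD i ' ' = '(' →
                (i + 1 < ((pre ++ ['(']) ++ d :: u'').length ∧
                  ¬ PySem.Chars.isdigit (((pre ++ ['(']) ++ d :: u'').getD (i + 1) ' ') = true ∧
                  ((pre ++ ['(']) ++ d :: u'').getD (i + 1) ' ' ≠ '?') := by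
              rw [← hsplitB]
              intro i hi hip
              simp only [List.length_append, List.length_cons, List.length_nil] at hi
              rcases Nat.lt_or_ge i pre.length with hlt | hge
              · exact hnq i hlt hip
              · have hieq : i = pre.length := by omega
                subst hieq
                refine ⟨by rw [hlenfull]; omega, ?_, ?_⟩
                · have : (pre ++ '(' :: d :: u'').getD (pre.length + 1) ' ' = d := by
                    rw [hsplitB]
                    have hl : pre.length + 1 = (pre ++ ['(']).length := by simp
                    rw [hl]
                    exact getD_append_at _ d u''
                  rw [this]; exact hd.1
                · have : (pre ++ '(' :: d :: u'').getD (pre.length + 1) ' ' = d := by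
                    rw [hsplitB]
                    have hl : pre.length + 1 = (pre ++ ['(']).length := by simp
                    rw [hl]
                    exact getD_append_at _ d u''
                  rw [this]; exact hd.2
            have hnd' : ¬ ((pre ++ ['(']) ++ d :: u'' = [] ∨
                ((PySem.Chars.isdigit (((pre ++ ['(']) ++ d :: u'').getD 0 ' ') = true ∨
                    ((pre ++ ['(']) ++ d :: u'').getD 0 ' ' = '?') ∧
                  ((pre ++ ['(']) ++ d :: u'').count '(' ≤ 20 ∧
                  noStopB ((pre ++ ['(']) ++ d :: u'') = true)) := by
              rw [← hsplitB]; exact hnd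
            have hih := ih (pre ++ ['(']) (skips + 1) (by omega) hcount' hnq' hnd' tlen
              (by rw [htl]; simp; omega)
            simpa using hih
    · -- c is not '(' : both sides step over it
      have hmap : pre.map blankC ++ c :: u' = (pre ++ [c]).map blankC ++ u' := by
        simp [blankC_eq hc]
      have hlist : pre ++ c :: u' = (pre ++ [c]) ++ u' := by simp
      have hilen : pre.length < (pre ++ c :: u').length := by simp
      rw [stOpAltGo, dif_pos hilen]
      rw [if_neg (by simp [List.getElem_append_right (Nat.le_refl pre.length)]; exact hc)]
      rw [hmap, hlist]
      have hcount' : (pre ++ [c]).count '(' = skips := by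
        simp [List.count_append, hcount, hc]
      have hnq' : ∀ i, i < (pre ++ [c]).length → ((pre ++ [c]) ++ u').getD i ' ' = '(' →
          (i + 1 < ((pre ++ [c]) ++ u').length ∧
            ¬ PySem.Chars.isdigit (((pre ++ [c]) ++ u').getD (i + 1) ' ') = true ∧
            ((pre ++ [c]) ++ u').getD (i + 1) ' ' ≠ '?') := by
        rw [← hlist]
        intro i hi hip
        simp only [List.length_append, List.length_cons, List.length_nil] at hi
        rcases Nat.lt_or_ge i pre.length with hlt | hge
        · exact hnq i hlt hip
        · have hieq : i = pre.length := by omega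
          subst hieq
          exfalso
          rw [getD_append_at] at hip
          exact hc hip
      have hnd' : ¬ ((pre ++ [c]) ++ u' = [] ∨
          ((PySem.Chars.isdigit (((pre ++ [c]) ++ u').getD 0 ' ') = true ∨
              ((pre ++ [c]) ++ u').getD 0 ' ' = '?') ∧
            ((pre ++ [c]) ++ u').count '(' ≤ 20 ∧ noStopB ((pre ++ [c]) ++ u') = true)) := by
        rw [← hlist]; exact hnd
      have hih := ih (pre ++ [c]) skips hs hcount' hnq' hnd' tlen (by rw [htl]; simp; omega)
      simp only [List.length_append, List.length_cons, List.length_nil] at hih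
      simpa using hih

-- inside D_ : A's loop ends at p = -1 with s[0] a digit or '?', returning -1
lemma drainNeg : ∀ (u pre : List Char) (skips : Nat), skips ≤ 20 →
    pre.count '(' = skips →
    pre ++ u ≠ [] →
    (PySem.Chars.isdigit ((pre ++ u).getD 0 ' ') = true ∨ (pre ++ u).getD 0 ' ' = '?') →
    (pre ++ u).count '(' ≤ 20 →
    noStopB (pre ++ u) = true →
    ∀ tlen : Nat,
    stOpGo tlen (pre.map blankC ++ u) (PySem.Chars.find (pre.map blankC ++ u) ['(']) skips = -1 := by
  intro u
  induction u with
  | nil =>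
    intro pre skips hs hcount hne h0 hcle hns tlen
    simp only [List.append_nil] at hne h0 ⊢
    rw [find_paren_none (not_paren_map_blank pre)]
    cases pre with
    | nil => exact absurd rfl hne
    | cons c pre' =>
      have hgd : (List.map blankC (c :: pre')).getD 0 ' ' = blankC c := by simp
      rw [stOpGo, if_neg]
      rintro ⟨-, -, hdig, hqm⟩
      simp only [neg_add_cancel, PySem.List.pyGetD_zero, hgd] at hdig hqm
      simp only [List.getD_cons_zero] at h0
      rcases h0 with h0 | h0
      · rw [isdigit_blankC] at hdig; exact hdig h0
      · rw [blankC_eq_qmark_iff] at hqm; exact hqm h0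
  | cons c u' ih =>
    intro pre skips hs hcount hne h0 hcle hns tlen
    by_cases hc : c = '('
    · subst hc
      rw [find_paren_append (not_paren_map_blank pre)]
      simp only [List.length_map]
      have hstop := (noStopB_iff _).mp hns pre.length (by simp)
        (by rw [getD_append_at])
      cases u' with
      | nil =>
        exfalso
        have := hstop.1
        simp at this
      | cons d u'' =>
        have hsplitA : List.map blankC pre ++ '(' :: d :: u''
            = (List.map blankC pre ++ ['(']) ++ d :: u'' := by simp
        have hsplitB : pre ++ '(' :: d :: u'' = (pre ++ ['(']) ++ d :: u'' := by simp
        have hdD : (pre ++ '(' :: d :: u'').getD (pre.length + 1) ' ' = d := by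
          rw [hsplitB]
          have hl : pre.length + 1 = (pre ++ ['(']).length := by simp
          rw [hl]
          exact getD_append_at _ d u''
        rw [hdD] at hstop
        have hA : PySem.List.pyGetD (List.map blankC pre ++ '(' :: d :: u'') ((pre.length : Int) + 1) ' ' = d := by
          have hcast : ((pre.length : Int) + 1) = ((pre.length + 1 : Nat) : Int) := by push_cast; ring
          rw [hcast, PySem.List.pyGetD_natCast, hsplitA]
          have hl : pre.length + 1 = (List.map blankC pre ++ ['(']).length := by simp
          rw [hl]
          exact getD_append_at _ d u''
        have hcond : ((pre.length : Int) < ((List.map blankC pre ++ '(' :: d :: u'').length : Int) ∧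
            (pre.length : Int) + 1 < ((List.map blankC pre ++ '(' :: d :: u'').length : Int) ∧
            ¬ PySem.Chars.isdigit (PySem.List.pyGetD (List.map blankC pre ++ '(' :: d :: u'') ((pre.length : Int) + 1) ' ') = true ∧
            ¬ PySem.List.pyGetD (List.map blankC pre ++ '(' :: d :: u'') ((pre.length : Int) + 1) ' ' = '?') := by
          refine ⟨?_, ?_, by rw [hA]; exact hstop.2.1, by rw [hA]; exact hstop.2.2⟩
          · have hl : (List.map blankC pre ++ '(' :: d :: u'').length = pre.length + (u''.length + 2) := by simp
            rw [hl]; push_cast; omega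
          · have hl : (List.map blankC pre ++ '(' :: d :: u'').length = pre.length + (u''.length + 2) := by simp
            rw [hl]; push_cast; omega
        have hskle : skips + 1 ≤ 20 := by
          have : (pre ++ '(' :: d :: u'').count '(' = skips + 1 + (d :: u'').count '(' := by
            simp [List.count_append, hcount]; ring
          omega
        rw [stOpGo, if_pos hcond, if_neg (by omega)]
        have hset : PySem.List.pySetD (List.map blankC pre ++ '(' :: d :: u'') (pre.length : Int) '_'
            = (pre ++ ['(']).map blankC ++ d :: u'' := by
          rw [PySem.List.pySetD_natCast]
          have hl : pre.length = (pre.map blankC).length := by simp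
          rw [hl, set_append_mid]
          simp [blankC]
        rw [hset]
        have hcount' : (pre ++ ['(']).count '(' = skips + 1 := by
          simp [List.count_append, hcount]
        have hih := ih (pre ++ ['(']) (skips + 1) hskle hcount'
          (by rw [← hsplitB]; exact hne)
          (by rw [← hsplitB]; exact h0)
          (by rw [← hsplitB]; exact hcle)
          (by rw [← hsplitB]; exact hns)
          tlen
        simpa using hih
    · have hmap : pre.map blankC ++ c :: u' = (pre ++ [c]).map blankC ++ u' := by
        simp [blankC_eq hc]
      have hlist : pre ++ c :: u' = (pre ++ [c]) ++ u' := by simp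
      rw [hmap]
      have hcount' : (pre ++ [c]).count '(' = skips := by
        simp [List.count_append, hcount, hc]
      have hih := ih (pre ++ [c]) skips hs hcount'
        (by rw [← hlist]; exact hne)
        (by rw [← hlist]; exact h0)
        (by rw [← hlist]; exact hcle)
        (by rw [← hlist]; exact hns)
        tlen
      simpa using hih

lemma altGo_nonneg (t : List Char) : ∀ (fuel i skips : Nat), t.length - i ≤ fuel →
    0 ≤ stOpAltGo t i skips := by
  intro fuel
  induction fuel with
  | zero =>
    intro i skips hf
    rw [stOpAltGo, dif_neg (by omega)]
    positivity
  | succ n ih =>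
    intro i skips hf
    rw [stOpAltGo]
    split
    · split
      · split
        · positivity
        · split
          · positivity
          · exact ih (i + 1) (skips + 1) (by omega)
      · exact ih (i + 1) skips (by omega)
    · positivity

-- ===== VERDICT (by name: the statements are the Claim_ definitions above) =====
theorem st_op_spec : Claim_unchanged_st_op := by
  intro t _
  unfold Spec_st_op
  intro hnd
  rw [D_iff] at hnd
  unfold st_op st_op_alt
  simpa using main_lemma t.toList [] 0 (by omega) (by simp)
    (by intro i hi; simp at hi) (by simpa using hnd) t.toList.length (by simp)

theorem st_op_changed : Claim_changed_st_op := by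
  unfold Claim_changed_st_op
  refine ⟨by decide, by decide, ?_, ?_, by decide⟩
  · show st_op pvDiffWitness_st_op = pvDiffWitnessOut_st_op.1
    unfold pvDiffWitness_st_op pvDiffWitnessOut_st_op st_op
    rw [show ("5" : String).toList = ['5'] from rfl]
    rw [show PySem.Chars.find ['5'] ['('] = -1 from by decide]
    rw [stOpGo, if_neg]
    rintro ⟨-, -, hdg, -⟩
    exact hdg (by decide)
  · show st_op_alt pvDiffWitness_st_op = pvDiffWitnessOut_st_op.2
    unfold pvDiffWitness_st_op pvDiffWitnessOut_st_op st_op_alt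
    rw [show ("5" : String).toList = ['5'] from rfl]
    rw [stOpAltGo, dif_pos (by decide), if_neg (by decide), stOpAltGo, dif_neg (by decide)]
    decide

theorem st_op_tight : Claim_exact_st_op := by
  intro t _ hd
  have hB : 0 ≤ st_op_alt t := altGo_nonneg t.toList t.toList.length 0 0 (by omega)
  have hA : st_op t = -1 := by
    rw [D_iff] at hd
    rcases hd with hd | hd
    · unfold st_op
      rw [hd]
      rw [find_paren_none (by simp : '(' ∉ ([] : List Char))]
      rw [stOpGo, if_neg (by rintro ⟨-, h2, -⟩; simp at h2)]
    · unfold st_op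
      have hne : t.toList ≠ [] := by
        intro h
        rw [h] at hd
        rcases hd.1 with h0 | h0
        · exact absurd h0 (by decide)
        · exact absurd h0 (by decide)
      simpa using drainNeg t.toList [] 0 (by omega) (by simp)
        (by simpa using hne) (by simpa using hd.1) (by simpa using hd.2.1)
        (by simpa using hd.2.2) t.toList.length
  omega
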